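-- pv_equiv track=rewrite | github.com/Nese2002/Reti-Di-Calcolarori | broadcast/launch.py | get_yaml
-- ===== SOURCE A (Python) =====
-- project_directory = "./src"
--
-- all_connected = True
--
-- def get_yaml(num_nodes, edges):
--     buffer = "services:\n"
--     for node in range(num_nodes):
--         buffer += f"\tnode{node}:\n"
--         buffer += "\t\tbuild:\n"
--         buffer += f"\t\t\tcontext: {project_directory}\n"
--         buffer += "\t\t\tdockerfile: Dockerfile\n"
--
--         params = [f"'{node}'"]
--         if all_connected:
--             for edge in edges:
--                 if edge[0] == node:
--                     params.append(f"'{edge[1]}'")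
--                 if edge[1] == node:
--                     params.append(f"'{edge[0]}'")
--
--         params = ", ".join(params)
--
--         buffer += f"\t\tcommand: [{params}]\n"
--
--         if not all_connected:
--             buffer += "\t\tnetworks:\n"
--             for edge in edges:
--                 if node in edge:
--                     buffer += f"\t\t- edge_{edge[0]}_{edge[1]}\n"
--     if not all_connected:
--         buffer += "networks:\n"
--         for edge in edges:
--             buffer += f"\tedge_{edge[0]}_{edge[1]}:\n"
--
--     buffer = buffer.replace("\t", "  ")
--     return buffer
-- ===== SOURCE B (Python) =====
-- project_directory = "./src"
--
-- def get_yaml(num_nodes, edges):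
--     # adjacency built in one pass over the edges (edge order preserved per node)
--     adj = {}
--     for u, v in [p for a, b in edges for p in ((a, b), (b, a))]:
--         adj.setdefault(u, []).append(v)
--     parts = ["services:\n"]
--     for node in range(num_nodes):
--         params = ", ".join("'%d'" % x for x in [node] + adj.get(node, []))
--         parts.append(
--             "  node%d:\n"
--             "    build:\n"
--             "      context: %s\n"
--             "      dockerfile: Dockerfile\n"
--             "    command: [%s]\n" % (node, project_directory, params)
--         )
--     return "".join(parts)
-- ===== Notes on version B (the rewrite author's own statement) =====
-- stated objective: faster
-- what changed: B precomputes an adjacency map in one pass over the edges (instead of A's rescan of every edge for every node) and emits the 2-space indentation directly instead of building a tab-indented buffer and replacing every tab at the end.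
import Mathlib
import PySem

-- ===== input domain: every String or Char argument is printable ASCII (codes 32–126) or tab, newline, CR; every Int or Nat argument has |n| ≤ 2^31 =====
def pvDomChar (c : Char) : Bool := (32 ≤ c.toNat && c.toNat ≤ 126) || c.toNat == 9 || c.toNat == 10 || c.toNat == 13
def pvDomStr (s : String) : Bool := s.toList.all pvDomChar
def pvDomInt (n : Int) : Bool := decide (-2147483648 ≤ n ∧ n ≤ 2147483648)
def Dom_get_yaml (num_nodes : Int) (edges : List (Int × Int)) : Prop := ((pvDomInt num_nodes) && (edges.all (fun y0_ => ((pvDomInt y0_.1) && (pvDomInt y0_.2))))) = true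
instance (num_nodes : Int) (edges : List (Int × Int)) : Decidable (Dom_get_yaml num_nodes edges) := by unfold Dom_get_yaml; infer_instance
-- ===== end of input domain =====

-- B replaces A's per-node scan of all edges by an adjacency map built in one edge
-- pass, and emits the 2-space indentation directly instead of a final tab replace.

-- ===== PORT A =====
def project_directory : String := "./src"
def all_connected : Bool := true

def get_yaml (num_nodes : Int) (edges : List (Int × Int)) : String :=
  let buffer : String := "services:\n"
  let buffer := (PySem.List.pyRange 0 num_nodes 1).foldl (fun buffer node =>
    let buffer := buffer ++ "\tnode" ++ PySem.Int.toStr node ++ ":\n"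
    let buffer := buffer ++ "\t\tbuild:\n"
    let buffer := buffer ++ "\t\t\tcontext: " ++ project_directory ++ "\n"
    let buffer := buffer ++ "\t\t\tdockerfile: Dockerfile\n"
    let params : List String := ["'" ++ PySem.Int.toStr node ++ "'"]
    let params :=
      if all_connected then
        edges.foldl (fun params edge =>
          let params := if edge.1 == node then params ++ ["'" ++ PySem.Int.toStr edge.2 ++ "'"] else params
          let params := if edge.2 == node then params ++ ["'" ++ PySem.Int.toStr edge.1 ++ "'"] else params
          params) params
      else params
    let paramsStr := PySem.Str.join ", " params
    let buffer := buffer ++ "\t\tcommand: [" ++ paramsStr ++ "]\n"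
    let buffer :=
      if !all_connected then
        edges.foldl (fun buffer edge =>
          if edge.1 == node || edge.2 == node then
            buffer ++ "\t\t- edge_" ++ PySem.Int.toStr edge.1 ++ "_" ++ PySem.Int.toStr edge.2 ++ "\n"
          else buffer) (buffer ++ "\t\tnetworks:\n")
      else buffer
    buffer) buffer
  let buffer :=
    if !all_connected then
      edges.foldl (fun buffer edge =>
        buffer ++ "\tedge_" ++ PySem.Int.toStr edge.1 ++ "_" ++ PySem.Int.toStr edge.2 ++ ":\n")
        (buffer ++ "networks:\n")
    else buffer
  PySem.Str.replace buffer "\t" "  "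

-- ===== PORT B =====
def get_yaml_alt (num_nodes : Int) (edges : List (Int × Int)) : String :=
  let pairs : List (Int × Int) := edges.flatMap (fun e => [(e.1, e.2), (e.2, e.1)])
  let adj : PySem.Dict Int (List Int) :=
    pairs.foldl (fun d p => d.modify p.1 [] (fun l => l ++ [p.2])) PySem.Dict.empty
  let parts : List String := (PySem.List.pyRange 0 num_nodes 1).foldl (fun parts node =>
    let params := PySem.Str.join ", "
      ((node :: adj.getD node []).map (fun x => "'" ++ PySem.Int.toStr x ++ "'"))
    parts ++ ["  node" ++ PySem.Int.toStr node ++ ":\n    build:\n      context: "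
      ++ project_directory ++ "\n      dockerfile: Dockerfile\n    command: [" ++ params ++ "]\n"])
    ["services:\n"]
  PySem.Str.join "" parts

-- ===== PRECONDITION & SPEC =====
def Spec_get_yaml (num_nodes : Int) (edges : List (Int × Int)) (out : String) : Prop := out = get_yaml_alt num_nodes edges
instance (num_nodes : Int) (edges : List (Int × Int)) (out : String) : Decidable (Spec_get_yaml num_nodes edges out) := by unfold Spec_get_yaml; infer_instance

-- ===== CLAIM (what is proved, stated in full; the proofs are below) =====
def Claim_equal_get_yaml : Prop := ∀ (num_nodes : Int) (edges : List (Int × Int)), Dom_get_yaml num_nodes edges → Spec_get_yaml num_nodes edges (get_yaml num_nodes edges)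

-- ===== LEMMAS AND PROOFS =====

-- what replacing a tab by two spaces does to one character
def tabExp (c : Char) : List Char := if c = '\t' then [' ', ' '] else [c]

theorem replace_single_go (c0 : Char) (new : List Char) :
    ∀ (fuel : Nat) (l acc : List Char), l.length ≤ fuel →
      PySem.Chars.replace.go [c0] new fuel l acc
        = acc.reverse ++ l.flatMap (fun c => if c = c0 then new else [c]) := by
  intro fuel
  induction fuel with
  | zero => intro l acc h; cases l with
    | nil => simp [PySem.Chars.replace.go]
    | cons c t => simp at h
  | succ n ih =>
    intro l acc h
    cases l with
    | nil => simp [PySem.Chars.replace.go]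
    | cons c t =>
      simp only [PySem.Chars.replace.go]
      by_cases hc : c = c0
      · subst hc
        have hp : [c].isPrefixOf (c :: t) = true := by simp [List.isPrefixOf]
        rw [if_pos hp, show List.drop [c].length (c :: t) = t from rfl,
            ih t _ (by simpa using h)]
        simp
      · have hp : [c0].isPrefixOf (c :: t) = false := by
          simp [List.isPrefixOf]; exact fun hh => hc hh.symm
        rw [if_neg (by rw [hp]; simp), ih t _ (by simpa using h)]
        simp [hc]

theorem replace_tab (s : List Char) :
    PySem.Chars.replace s ['\t'] [' ', ' '] = s.flatMap tabExp := by
  unfold PySem.Chars.replace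
  rw [if_neg (by simp), replace_single_go '\t' [' ', ' '] s.length s [] (le_refl _)]
  rfl

def TabFree (s : List Char) : Prop := ∀ c ∈ s, c ≠ '\t'

theorem tabFree_of_all (s : List Char) (h : s.all (fun c => !(c == '\t')) = true) : TabFree s := by
  intro c hc
  have := List.all_eq_true.mp h c hc
  simpa using this

theorem flatMap_tabExp_of_tabFree (s : List Char) (h : TabFree s) : s.flatMap tabExp = s := by
  induction s with
  | nil => rfl
  | cons c t ih =>
    have hc : c ≠ '\t' := h c (by simp)
    simp [tabExp, hc, ih (fun d hd => h d (by simp [hd]))]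

theorem digitChar_ne_tab (m : Nat) : Nat.digitChar m ≠ '\t' := by
  rcases Nat.lt_or_ge m 16 with h | h
  · interval_cases m <;> decide
  · have : Nat.digitChar m = '*' := by
      unfold Nat.digitChar
      rw [if_neg (by omega), if_neg (by omega), if_neg (by omega), if_neg (by omega),
          if_neg (by omega), if_neg (by omega), if_neg (by omega), if_neg (by omega),
          if_neg (by omega), if_neg (by omega), if_neg (by omega), if_neg (by omega),
          if_neg (by omega), if_neg (by omega), if_neg (by omega), if_neg (by omega)]
    rw [this]; decide

theorem tabFree_toDigitsCore (b : Nat) :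
    ∀ (fuel n : Nat) (ds : List Char), TabFree ds → TabFree (Nat.toDigitsCore b fuel n ds) := by
  intro fuel
  induction fuel with
  | zero => intro n ds h; simpa [Nat.toDigitsCore] using h
  | succ f ih =>
    intro n ds h
    have hd : TabFree ((n % b).digitChar :: ds) := by
      intro c hc
      rcases List.mem_cons.mp hc with rfl | hc
      · exact digitChar_ne_tab _
      · exact h c hc
    simp only [Nat.toDigitsCore]
    split
    · exact hd
    · exact ih _ _ hd

theorem tabFree_toChars (n : Int) : TabFree (PySem.Int.toChars n) := by
  unfold PySem.Int.toChars
  split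
  · intro c hc
    rcases List.mem_cons.mp hc with rfl | hc
    · decide
    · exact tabFree_toDigitsCore 10 _ _ [] (by intro c h; simp at h) c hc
  · exact tabFree_toDigitsCore 10 _ _ [] (by intro c h; simp at h)

theorem tabFree_append {s t : List Char} (hs : TabFree s) (ht : TabFree t) : TabFree (s ++ t) := by
  intro c hc
  rcases List.mem_append.mp hc with h | h
  · exact hs c h
  · exact ht c h

theorem tabFree_join (sep : List Char) (parts : List (List Char))
    (hsep : TabFree sep) (hp : ∀ p ∈ parts, TabFree p) : TabFree (PySem.Chars.join sep parts) := by
  induction parts with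
  | nil => intro c hc; simp [PySem.Chars.join, List.intercalate] at hc
  | cons p rest ih =>
    cases rest with
    | nil =>
      rw [PySem.Chars.join_singleton]
      exact hp p (by simp)
    | cons q rs =>
      rw [PySem.Chars.join_cons_cons]
      exact tabFree_append (tabFree_append (hp p (by simp)) hsep)
        (ih (fun r hr => hp r (by simp [hr])))

-- the quoted-int strings both programs join
def quoteI (x : Int) : String := "'" ++ PySem.Int.toStr x ++ "'"

-- the neighbor list of a node, in A's scan order
def nbrs (edges : List (Int × Int)) (node : Int) : List Int :=
  edges.flatMap (fun e => (if e.1 = node then [e.2] else []) ++ (if e.2 = node then [e.1] else []))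

theorem A_params (edges : List (Int × Int)) (node : Int) (ps : List String) :
    edges.foldl (fun params edge =>
      let params := if edge.1 == node then params ++ ["'" ++ PySem.Int.toStr edge.2 ++ "'"] else params
      let params := if edge.2 == node then params ++ ["'" ++ PySem.Int.toStr edge.1 ++ "'"] else params
      params) ps
    = ps ++ (nbrs edges node).map quoteI := by
  have hb : (fun (params : List String) (edge : Int × Int) =>
      let params := if edge.1 == node then params ++ ["'" ++ PySem.Int.toStr edge.2 ++ "'"] else params
      let params := if edge.2 == node then params ++ ["'" ++ PySem.Int.toStr edge.1 ++ "'"] else params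
      params)
    = (fun params edge => params ++
        (((if edge.1 = node then [edge.2] else []) ++ (if edge.2 = node then [edge.1] else [])).map quoteI)) := by
    funext ps e
    by_cases h1 : e.1 = node <;> by_cases h2 : e.2 = node <;>
      simp [h1, h2, quoteI]
  rw [hb, PySem.List.foldl_append_eq_flatMap]
  unfold nbrs
  rw [List.map_flatMap]

theorem B_adj (edges : List (Int × Int)) (node : Int) :
    ((edges.flatMap (fun e => [(e.1, e.2), (e.2, e.1)])).foldl
        (fun d p => d.modify p.1 [] (fun l => l ++ [p.2])) PySem.Dict.empty).getD node []
      = nbrs edges node := by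
  rw [PySem.Dict.getD_foldl_modify_append]
  simp only [PySem.Dict.getD_empty, List.nil_append]
  rw [List.filter_flatMap, List.map_flatMap]
  unfold nbrs
  congr 1
  funext e
  by_cases h1 : e.1 = node <;> by_cases h2 : e.2 = node <;>
    simp [List.filter_nil, h1, h2]

-- string-level chunks: what A appends for one node (before the tab replace), what B appends
def chunkA (edges : List (Int × Int)) (node : Int) : String :=
  "\tnode" ++ PySem.Int.toStr node ++ ":\n" ++ "\t\tbuild:\n" ++ "\t\t\tcontext: " ++ "./src" ++ "\n"
    ++ "\t\t\tdockerfile: Dockerfile\n" ++ "\t\tcommand: ["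
    ++ PySem.Str.join ", " ((node :: nbrs edges node).map quoteI) ++ "]\n"

def chunkB (edges : List (Int × Int)) (node : Int) : String :=
  "  node" ++ PySem.Int.toStr node ++ ":\n    build:\n      context: " ++ "./src"
    ++ "\n      dockerfile: Dockerfile\n    command: ["
    ++ PySem.Str.join ", " ((node :: nbrs edges node).map quoteI) ++ "]\n"

theorem toList_foldl_append {α : Type} (g : α → String) (l : List α) (acc : String) :
    (l.foldl (fun acc x => acc ++ g x) acc).toList
      = acc.toList ++ l.flatMap (fun x => (g x).toList) := by
  induction l generalizing acc with
  | nil => simp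
  | cons x t ih => simp [ih, String.toList_append]

theorem A_buffer (num_nodes : Int) (edges : List (Int × Int)) :
    get_yaml num_nodes edges
      = PySem.Str.replace
          ((PySem.List.pyRange 0 num_nodes 1).foldl
            (fun buffer node => buffer ++ chunkA edges node) "services:\n") "\t" "  " := by
  simp only [get_yaml, all_connected, Bool.not_true, reduceIte]
  congr 1
  apply PySem.List.foldl_congr_mem
  intro acc node _
  rw [A_params]
  simp [chunkA, quoteI, project_directory, String.append_assoc]

theorem join_empty_sep (parts : List (List Char)) :
    PySem.Chars.join [] parts = parts.flatten := by
  induction parts with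
  | nil => rfl
  | cons p rest ih =>
    cases rest with
    | nil => rw [PySem.Chars.join_singleton]; simp
    | cons q rs => rw [PySem.Chars.join_cons_cons]; simp_all

theorem B_parts (num_nodes : Int) (edges : List (Int × Int)) :
    get_yaml_alt num_nodes edges
      = PySem.Str.join "" ("services:\n" :: (PySem.List.pyRange 0 num_nodes 1).map (chunkB edges)) := by
  simp only [get_yaml_alt]
  congr 1
  rw [PySem.List.foldl_congr_mem _ _ (fun parts node => parts ++ [chunkB edges node]) _
       (by intro acc node _
           rw [B_adj]
           unfold chunkB quoteI
           simp [project_directory, String.append_assoc]),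
      PySem.List.foldl_append_singleton_eq_map]
  rfl

theorem tabFree_params (edges : List (Int × Int)) (node : Int) :
    TabFree (PySem.Str.join ", " ((node :: nbrs edges node).map quoteI)).toList := by
  rw [PySem.Str.toList_join]
  apply tabFree_join
  · exact tabFree_of_all _ (by decide)
  · intro p hp
    simp only [List.map_map, List.mem_map] at hp
    obtain ⟨x, _, rfl⟩ := hp
    show TabFree (quoteI x).toList
    unfold quoteI
    simp only [String.toList_append, PySem.Int.toList_toStr]
    exact tabFree_append (tabFree_append (tabFree_of_all "'".toList (by decide))
      (tabFree_toChars x)) (tabFree_of_all "'".toList (by decide))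

theorem chunk_eq (edges : List (Int × Int)) (node : Int) :
    (chunkA edges node).toList.flatMap tabExp = (chunkB edges node).toList := by
  have hS : (PySem.Int.toStr node).toList.flatMap tabExp = (PySem.Int.toStr node).toList :=
    flatMap_tabExp_of_tabFree _ (by rw [PySem.Int.toList_toStr]; exact tabFree_toChars node)
  have hP : (PySem.Str.join ", " ((node :: nbrs edges node).map quoteI)).toList.flatMap tabExp
      = (PySem.Str.join ", " ((node :: nbrs edges node).map quoteI)).toList :=
    flatMap_tabExp_of_tabFree _ (tabFree_params edges node)
  unfold chunkA chunkB
  simp only [String.toList_append, List.flatMap_append]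
  rw [hS, hP]
  rw [show ("\tnode" : String).toList.flatMap tabExp = ("  node" : String).toList from by decide,
      show (":\n" : String).toList.flatMap tabExp = (":\n" : String).toList from by decide,
      show ("\t\tbuild:\n" : String).toList.flatMap tabExp = ("    build:\n" : String).toList from by decide,
      show ("\t\t\tcontext: " : String).toList.flatMap tabExp = ("      context: " : String).toList from by decide,
      show ("./src" : String).toList.flatMap tabExp = ("./src" : String).toList from by decide,
      show ("\n" : String).toList.flatMap tabExp = ("\n" : String).toList from by decide,
      show ("\t\t\tdockerfile: Dockerfile\n" : String).toList.flatMap tabExp = ("      dockerfile: Dockerfile\n" : String).toList from by decide,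
      show ("\t\tcommand: [" : String).toList.flatMap tabExp = ("    command: [" : String).toList from by decide,
      show ("]\n" : String).toList.flatMap tabExp = ("]\n" : String).toList from by decide]
  rw [show (":\n    build:\n      context: " : String).toList
        = (":\n" : String).toList ++ ("    build:\n" : String).toList ++ ("      context: " : String).toList from by decide,
      show ("\n      dockerfile: Dockerfile\n    command: [" : String).toList
        = ("\n" : String).toList ++ ("      dockerfile: Dockerfile\n" : String).toList ++ ("    command: [" : String).toList from by decide]
  simp [List.append_assoc]

-- ===== VERDICT (by name: the statement is the Claim_ definition above) =====
theorem get_yaml_spec : Claim_equal_get_yaml := by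
  intro num_nodes edges _
  unfold Spec_get_yaml
  rw [A_buffer, B_parts]
  apply String.toList_inj.mp
  rw [PySem.Str.toList_replace, show ("\t" : String).toList = ['\t'] from by decide,
      show ("  " : String).toList = [' ', ' '] from by decide, replace_tab,
      toList_foldl_append, PySem.Str.toList_join,
      show ("" : String).toList = [] from by decide, join_empty_sep]
  simp only [List.flatMap_append, List.map_cons, List.map_map,
    List.flatMap_assoc, List.flatten_eq_flatMap]
  rw [show "services:\n".toList.flatMap tabExp = "services:\n".toList from by decide]
  congr 1
  simp only [chunk_eq]
  generalize PySem.List.pyRange 0 num_nodes 1 = r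
  induction r with
  | nil => rfl
  | cons x t ih => simp_all
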